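-- pv_equiv track=rewrite | github.com/adlerosn/corpusslayer | plugins/concord/searcher.py | backslashRemovingEscaped
-- ===== SOURCE A (Python) =====
-- def backslashRemovingEscaped(stri):
--     escape = False
--     escaped = ''
--     for char in stri:
--         if escape:
--             escape=False;
--         else:
--             if char=='\\':
--                 escape=True;
--             else:
--                 escaped+=char;
--     return escaped
-- ===== SOURCE B (Python) =====
-- def backslashRemovingEscaped(stri):
--     out = []
--     i = 0
--     n = len(stri)
--     while i < n:
--         c = stri[i]
--         if c == '\\':
--             i += 2
--         else:
--             out.append(c)
--             i += 1
--     return ''.join(out)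
-- ===== Notes on version B (the rewrite author's own statement) =====
-- stated objective: idiomatic
-- what changed: Replaces the boolean escape-flag state machine with an index loop that skips two positions on a backslash and collects kept characters in a list joined once at the end.
import Mathlib
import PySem

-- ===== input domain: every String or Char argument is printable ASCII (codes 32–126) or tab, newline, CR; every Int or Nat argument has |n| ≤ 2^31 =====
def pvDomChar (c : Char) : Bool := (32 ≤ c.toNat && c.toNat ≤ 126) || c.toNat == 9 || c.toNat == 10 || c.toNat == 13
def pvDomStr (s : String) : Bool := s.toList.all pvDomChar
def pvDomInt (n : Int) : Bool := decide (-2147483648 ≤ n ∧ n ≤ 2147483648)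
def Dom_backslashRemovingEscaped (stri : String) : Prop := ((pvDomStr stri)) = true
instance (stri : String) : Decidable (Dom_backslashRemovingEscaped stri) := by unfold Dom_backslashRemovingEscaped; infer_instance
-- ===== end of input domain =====

-- B is an idiomatic index-skipping rewrite of A's escape-flag state machine; return value only, no mutation.

-- ===== PORT A =====
-- state = (escape, escaped); one fold step per character, exactly A's branch order
def breStep (s : Bool × List Char) (char : Char) : Bool × List Char :=
  if s.1 then (false, s.2)
  else if char = '\\' then (true, s.2)
  else (s.1, s.2 ++ [char])

def backslashRemovingEscaped (stri : String) : String :=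
  String.mk (stri.toList.foldl breStep (false, [])).2

-- ===== PORT B =====
-- Source B's while loop: on a backslash skip two positions, otherwise keep the char and advance one
def breGo : List Char → List Char
  | [] => []
  | c :: rest =>
    if c = '\\' then breGo rest.tail
    else c :: breGo rest
termination_by l => l.length
decreasing_by
  · simp only [List.length_cons, List.length_tail]
    omega
  · simp

def backslashRemovingEscaped_alt (stri : String) : String :=
  String.mk (breGo stri.toList)

-- ===== PRECONDITION & SPEC =====
def Spec_backslashRemovingEscaped (stri : String) (out : String) : Prop := out = backslashRemovingEscaped_alt stri
instance (stri : String) (out : String) : Decidable (Spec_backslashRemovingEscaped stri out) := by unfold Spec_backslashRemovingEscaped; infer_instance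

-- ===== CLAIM (what is proved, stated in full; the proofs are below) =====
def Claim_equal_backslashRemovingEscaped : Prop := ∀ (stri : String), Dom_backslashRemovingEscaped stri → Spec_backslashRemovingEscaped stri (backslashRemovingEscaped stri)

-- ===== LEMMAS AND PROOFS =====

-- loop invariant: in normal mode the fold appends breGo l; in escape mode the next char is dropped first
theorem breFold_invariant (l : List Char) : ∀ acc : List Char,
    (l.foldl breStep (false, acc)).2 = acc ++ breGo l ∧
    (l.foldl breStep (true, acc)).2 = acc ++ breGo l.tail := by
  induction l with
  | nil => intro acc; simp [breGo]
  | cons c rest ih =>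
    intro acc
    constructor
    · by_cases h : c = '\\'
      · simp only [List.foldl_cons, breStep, h, if_true]
        simpa [breGo, h] using (ih acc).2
      · simp only [List.foldl_cons, breStep, h, if_false]
        simpa [breGo, h] using (ih (acc ++ [c])).1
    · simp only [List.foldl_cons, breStep, if_true, List.tail_cons]
      exact (ih acc).1

-- ===== VERDICT (by name: the statement is the Claim_ definition above) =====
theorem backslashRemovingEscaped_spec : Claim_equal_backslashRemovingEscaped := by
  intro stri _
  unfold Spec_backslashRemovingEscaped backslashRemovingEscaped backslashRemovingEscaped_alt
  rw [(breFold_invariant stri.toList []).1]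
  simp
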